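-- pv_equiv track=rewrite | github.com/orihamama/tokscope | src/tokenscope/bash_parse.py | _count_top_level_pipes
-- ===== SOURCE A (Python) =====
-- def _count_top_level_pipes(s: str) -> int:
--     """Count `|` not inside quotes/escape."""
--     in_s = False
--     in_d = False
--     esc = False
--     n = 0
--     for ch in s:
--         if esc:
--             esc = False
--             continue
--         if ch == "\\":
--             esc = True
--             continue
--         if ch == "'" and not in_d:
--             in_s = not in_s
--         elif ch == '"' and not in_s:
--             in_d = not in_d
--         elif ch == "|" and not in_s and not in_d:
--             n += 1
--     return n
-- ===== SOURCE B (Python) =====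
-- def _count_top_level_pipes(s: str) -> int:
--     """Count `|` not inside quotes/escape.
--
--     Two passes: first strip escape sequences (a backslash consumes the
--     following character; a trailing lone backslash is dropped), then scan
--     the cleaned text with a reduced two-state quote machine.
--     """
--     cleaned = []
--     it = iter(s)
--     for ch in it:
--         if ch == "\\":
--             next(it, None)  # discard the escaped character
--         else:
--             cleaned.append(ch)
--     in_s = False
--     in_d = False
--     n = 0
--     for ch in cleaned:
--         if ch == "'" and not in_d:
--             in_s = not in_s
--         elif ch == '"' and not in_s:
--             in_d = not in_d
--         elif ch == "|" and not in_s and not in_d: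
--             n += 1
--     return n
-- ===== Notes on version B (the rewrite author's own statement) =====
-- stated objective: alternative
-- what changed: A's single fused four-state loop (quotes + escape flag + counter) is split into two passes: a first pass that deletes every escape sequence (backslash consumes the next character), then a reduced two-state quote scan that counts pipes at top level.
import Mathlib
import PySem

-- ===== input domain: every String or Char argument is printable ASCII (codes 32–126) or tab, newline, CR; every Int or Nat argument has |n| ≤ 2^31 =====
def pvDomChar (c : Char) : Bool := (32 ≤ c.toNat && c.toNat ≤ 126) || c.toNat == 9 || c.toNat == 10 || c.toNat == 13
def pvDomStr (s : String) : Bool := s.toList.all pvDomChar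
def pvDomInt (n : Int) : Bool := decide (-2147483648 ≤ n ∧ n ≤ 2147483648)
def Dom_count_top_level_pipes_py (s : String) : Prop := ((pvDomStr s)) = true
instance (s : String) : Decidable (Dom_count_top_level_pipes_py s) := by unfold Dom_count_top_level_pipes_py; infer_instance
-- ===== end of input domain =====

-- B replaces A's fused four-state loop by two passes: strip escape sequences, then a
-- two-state quote scan (objective: simpler decomposition; same cost).

-- ===== PORT A =====
-- A's single loop over the characters, carrying (in_s, in_d, esc, n).
def pvALoop : List Char → Bool → Bool → Bool → Int → Int
  | [], _, _, _, n => n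
  | c :: cs, in_s, in_d, esc, n =>
    if esc then pvALoop cs in_s in_d false n
    else if c = '\\' then pvALoop cs in_s in_d true n
    else if c = '\'' && !in_d then pvALoop cs (!in_s) in_d false n
    else if c = '"' && !in_s then pvALoop cs in_s (!in_d) false n
    else if c = '|' && !in_s && !in_d then pvALoop cs in_s in_d false (n + 1)
    else pvALoop cs in_s in_d false n

def count_top_level_pipes_py (s : String) : Int :=
  pvALoop s.toList false false false 0

-- ===== PORT B =====
-- pass 1: a backslash consumes the following character; a trailing lone backslash is dropped.
def pvStripEsc : List Char → List Char
  | [] => []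
  | c :: cs =>
    if c = '\\' then
      match cs with
      | [] => []
      | _ :: cs' => pvStripEsc cs'
    else c :: pvStripEsc cs

-- pass 2: two-state quote machine over the cleaned text.
def pvBScan : List Char → Bool → Bool → Int → Int
  | [], _, _, n => n
  | c :: cs, in_s, in_d, n =>
    if c = '\'' && !in_d then pvBScan cs (!in_s) in_d n
    else if c = '"' && !in_s then pvBScan cs in_s (!in_d) n
    else if c = '|' && !in_s && !in_d then pvBScan cs in_s in_d (n + 1)
    else pvBScan cs in_s in_d n

def count_top_level_pipes_py_alt (s : String) : Int :=
  pvBScan (pvStripEsc s.toList) false false 0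

-- ===== PRECONDITION & SPEC =====
def Spec_count_top_level_pipes_py (s : String) (out : Int) : Prop := out = count_top_level_pipes_py_alt s
instance (s : String) (out : Int) : Decidable (Spec_count_top_level_pipes_py s out) := by unfold Spec_count_top_level_pipes_py; infer_instance

-- ===== CLAIM (what is proved, stated in full; the proofs are below) =====
def Claim_equal_count_top_level_pipes_py : Prop := ∀ (s : String), Dom_count_top_level_pipes_py s → Spec_count_top_level_pipes_py s (count_top_level_pipes_py s)

-- ===== LEMMAS AND PROOFS =====

-- A with esc = false equals B's scan of the escape-stripped text, for every state.
theorem pvALoop_eq_bScan (l : List Char) :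
    ∀ in_s in_d n, pvALoop l in_s in_d false n = pvBScan (pvStripEsc l) in_s in_d n := by
  induction l using pvStripEsc.induct with
  | case1 => intro _ _ _; simp [pvALoop, pvStripEsc, pvBScan]
  | case2 =>
      intro in_s in_d n
      simp [pvALoop, pvStripEsc, pvBScan]
  | case3 c' cs' ih =>
      intro in_s in_d n
      simp [pvALoop, pvStripEsc, ih]
  | case4 c cs h ih =>
      intro in_s in_d n
      have hs : pvStripEsc (c :: cs) = c :: pvStripEsc cs := by
        rw [pvStripEsc.eq_def]
        simp [h]
      rw [hs, pvALoop, pvBScan]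
      split_ifs <;> first | exact ih _ _ _ | simp_all

-- ===== VERDICT (by name: the statement is the Claim_ definition above) =====
theorem count_top_level_pipes_py_spec : Claim_equal_count_top_level_pipes_py := by
  intro s _
  unfold Spec_count_top_level_pipes_py count_top_level_pipes_py count_top_level_pipes_py_alt
  exact pvALoop_eq_bScan s.toList false false 0
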